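-- pv_equiv track=rewrite | github.com/srom/cwb | src/pg_modelling/protenix/run_colabfold_postprocess.py | _extract_sequence
-- ===== SOURCE A (Python) =====
-- from typing import Dict, List, Tuple
--
-- def _extract_sequence(line: str, range_tuple: Tuple[int, int]) -> str:
--     """Extract sequence for specific range."""
--     seq = []
--     no_insert_count = 0
--     start, end = range_tuple
--
--     for char in line:
--         if char.isupper() or char == "-":
--             no_insert_count += 1
--         # we keep insertions
--         if start < no_insert_count <= end:
--             seq.append(char)
--         elif no_insert_count > end:
--             break
--
--     return "".join(seq)
-- ===== SOURCE B (Python) =====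
-- def _extract_sequence(line, range_tuple):
--     """Extract sequence for specific range: locate the two slice boundaries, then slice."""
--     start, end = range_tuple
--
--     def boundary(threshold):
--         # index of the first character at which the running column count
--         # (uppercase or '-') exceeds `threshold`; len(line) if never.
--         count = 0
--         for idx, char in enumerate(line):
--             if char.isupper() or char == "-":
--                 count += 1
--             if count > threshold:
--                 return idx
--         return len(line)
--
--     return line[boundary(start):boundary(end)]
-- ===== Notes on version B (the rewrite author's own statement) =====
-- stated objective: alternative
-- what changed: Instead of A's single loop that appends kept characters one by one and breaks past the range, B locates the two slice boundaries (first index where the running column count exceeds start, resp. end) and returns one direct slice line[i:j], relying on the kept characters being contiguous.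
import Mathlib
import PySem

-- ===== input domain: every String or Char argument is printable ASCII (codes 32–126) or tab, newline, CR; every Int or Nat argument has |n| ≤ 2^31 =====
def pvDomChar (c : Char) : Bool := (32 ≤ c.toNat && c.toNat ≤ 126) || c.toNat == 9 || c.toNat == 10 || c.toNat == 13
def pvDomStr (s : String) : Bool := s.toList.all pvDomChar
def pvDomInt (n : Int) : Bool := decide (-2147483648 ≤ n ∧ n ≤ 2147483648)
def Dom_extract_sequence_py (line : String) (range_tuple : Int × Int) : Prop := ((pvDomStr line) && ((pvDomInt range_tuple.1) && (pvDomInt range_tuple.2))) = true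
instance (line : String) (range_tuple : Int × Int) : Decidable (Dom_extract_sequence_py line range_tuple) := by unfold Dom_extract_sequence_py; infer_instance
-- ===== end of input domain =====

-- B replaces A's append-and-break collection loop by locating the two slice
-- boundaries and returning one direct slice (alternative decomposition, same cost).

-- ===== PORT A =====
-- char.isupper() or char == "-"
def pvColChar (c : Char) : Bool := PySem.Chars.isupper c || c == '-'

def pvStep (c : Char) (cnt : Int) : Int := if pvColChar c then cnt + 1 else cnt

-- A's loop: state = running no_insert_count; appends kept chars, breaks past `end`
def pvExtractAux (s e : Int) : List Char → Int → List Char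
  | [], _ => []
  | c :: rest, cnt =>
    if s < pvStep c cnt ∧ pvStep c cnt ≤ e then c :: pvExtractAux s e rest (pvStep c cnt)
    else if e < pvStep c cnt then []
    else pvExtractAux s e rest (pvStep c cnt)

def extract_sequence_py (line : String) (range_tuple : Int × Int) : String :=
  String.ofList (pvExtractAux range_tuple.1 range_tuple.2 line.toList 0)

-- ===== PORT B =====
-- boundary(threshold): index of the first char at which the running column
-- count exceeds threshold; len(line) if never (here written relatively).
def pvBoundAux (t : Int) : List Char → Int → Nat
  | [], _ => 0
  | c :: rest, cnt =>
    if t < pvStep c cnt then 0 else 1 + pvBoundAux t rest (pvStep c cnt)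

def extract_sequence_py_alt (line : String) (range_tuple : Int × Int) : String :=
  String.ofList (PySem.List.slice line.toList
    (some ((pvBoundAux range_tuple.1 line.toList 0 : Nat) : Int))
    (some ((pvBoundAux range_tuple.2 line.toList 0 : Nat) : Int)))

-- ===== PRECONDITION & SPEC =====
def Spec_extract_sequence_py (line : String) (range_tuple : Int × Int) (out : String) : Prop := out = extract_sequence_py_alt line range_tuple
instance (line : String) (range_tuple : Int × Int) (out : String) : Decidable (Spec_extract_sequence_py line range_tuple out) := by unfold Spec_extract_sequence_py; infer_instance

-- ===== CLAIM (what is proved, stated in full; the proofs are below) =====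
def Claim_equal_extract_sequence_py : Prop := ∀ (line : String) (range_tuple : Int × Int), Dom_extract_sequence_py line range_tuple → Spec_extract_sequence_py line range_tuple (extract_sequence_py line range_tuple)

-- ===== LEMMAS AND PROOFS =====

theorem pvStep_ge (c : Char) (cnt : Int) : cnt ≤ pvStep c cnt := by
  unfold pvStep; split <;> omega

theorem pvBoundAux_of_lt (t : Int) (l : List Char) (cnt : Int) (h : t < cnt) :
    pvBoundAux t l cnt = 0 := by
  cases l with
  | nil => rfl
  | cons c rest =>
    rw [pvBoundAux, if_pos (lt_of_lt_of_le h (pvStep_ge c cnt))]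

theorem pvExtract_eq_bounds (s e : Int) (l : List Char) (cnt : Int) :
    pvExtractAux s e l cnt
      = (l.drop (pvBoundAux s l cnt)).take (pvBoundAux e l cnt - pvBoundAux s l cnt) := by
  induction l generalizing cnt with
  | nil => rfl
  | cons c rest ih =>
    rw [pvExtractAux, pvBoundAux, pvBoundAux]
    by_cases h1 : s < pvStep c cnt ∧ pvStep c cnt ≤ e
    · rw [if_pos h1, if_pos h1.1, if_neg (by omega)]
      simp only [List.drop_zero, Nat.sub_zero, Nat.add_comm 1, List.take_succ_cons]
      rw [ih, pvBoundAux_of_lt s rest _ h1.1]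
      simp
    · rw [if_neg h1]
      by_cases h2 : e < pvStep c cnt
      · rw [if_pos h2, if_pos h2]
        simp
      · rw [if_neg h2, if_neg h2, if_neg (by omega)]
        simp only [Nat.add_comm 1, List.drop_succ_cons]
        rw [ih]
        congr 1
        omega

-- ===== VERDICT (by name: the statement is the Claim_ definition above) =====
theorem extract_sequence_py_spec : Claim_equal_extract_sequence_py := by
  intro line rt _
  unfold Spec_extract_sequence_py extract_sequence_py extract_sequence_py_alt
  rw [PySem.List.slice_natCast, pvExtract_eq_bounds]
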